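-- pv_equiv track=rewrite | github.com/Pasidu-Mihiranga/Auditra-CodeCogs | auditra/cleanup_remaining_dialogs.py | remove_method
-- ===== SOURCE A (Python) =====
-- def remove_method(s, sig):
--     start = s.find(sig)
--     if start != -1:
--         open_brace = s.find('{', start)
--         if open_brace != -1:
--             brace_count = 1
--             i = open_brace + 1
--             while brace_count > 0 and i < len(s):
--                 if s[i] == '{':
--                     brace_count += 1
--                 elif s[i] == '}':
--                     brace_count -= 1
--                 i += 1
--             return s[:start] + s[i:]
--     return s
-- ===== SOURCE B (Python) =====
-- def remove_method(s, sig):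
--     start = s.find(sig)
--     if start == -1:
--         return s
--     open_brace = s.find('{', start)
--     if open_brace == -1:
--         return s
--     depth = 1
--     pos = open_brace + 1
--     while depth > 0:
--         next_close = s.find('}', pos)
--         if next_close == -1:
--             pos = len(s)
--             break
--         next_open = s.find('{', pos)
--         if next_open != -1 and next_open < next_close:
--             depth += 1
--             pos = next_open + 1
--         else:
--             depth -= 1
--             pos = next_close + 1
--     return s[:start] + s[pos:]
-- ===== Notes on version B (the rewrite author's own statement) =====
-- stated objective: alternative
-- what changed: A walks the string character by character counting braces; B jump-scans, repeatedly using s.find('{', pos) / s.find('}', pos) to hop directly to the next brace and adjusting the depth there.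
import Mathlib
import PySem

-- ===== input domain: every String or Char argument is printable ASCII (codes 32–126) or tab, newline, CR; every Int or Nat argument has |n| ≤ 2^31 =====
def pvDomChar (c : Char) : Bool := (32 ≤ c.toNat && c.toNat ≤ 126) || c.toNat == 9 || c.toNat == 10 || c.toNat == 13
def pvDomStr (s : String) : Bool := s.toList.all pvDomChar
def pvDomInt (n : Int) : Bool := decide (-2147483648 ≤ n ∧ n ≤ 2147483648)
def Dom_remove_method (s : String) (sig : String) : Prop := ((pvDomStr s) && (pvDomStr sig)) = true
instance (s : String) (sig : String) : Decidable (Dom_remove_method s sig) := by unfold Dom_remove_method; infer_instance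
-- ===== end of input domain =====

-- B replaces A's character-by-character brace walk with a jump scan that advances directly
-- to the next '{' or '}' via find-from-position (objective: alternative decomposition).

-- ===== PORT A =====
-- A's while loop: walks the chars after the opening brace one by one, tracking brace_count
-- and the absolute index i (the list is s[i:], so the empty list is exactly i = len(s)).
def pvLoopA : List Char → Int → Int → Int
  | [], _, i => i
  | c :: cs, d, i =>
    if d ≤ 0 then i
    else pvLoopA cs (if c == '{' then d + 1 else if c == '}' then d - 1 else d) (i + 1)

def remove_method (s : String) (sig : String) : String :=
  let start := PySem.Str.find s sig
  if start ≠ -1 then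
    let ob := PySem.Str.findFrom s "{" start
    if ob ≠ -1 then
      -- ob ≥ 0 here, so .toNat is exact; the loop runs over s[ob+1:] with i = ob + 1
      let i := pvLoopA (s.toList.drop (ob.toNat + 1)) 1 (ob + 1)
      String.mk (PySem.List.slice s.toList none (some start) ++
                 PySem.List.slice s.toList (some i) none)
    else s
  else s

-- ===== PORT B =====
-- B's while loop: s.find('}', pos) / s.find('{', pos) become findIdx? on the suffix s[pos:]
-- (same index, shifted by pos); n = len(s). Jumps straight to the nearer brace.
def pvLoopB (l : List Char) (d pos n : Int) : Int :=
  if d ≤ 0 then pos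
  else
    match hc : l.findIdx? (· == '}') with
    | none => n
    | some b =>
      match l.findIdx? (· == '{') with
      | some a =>
        if a < b then pvLoopB (l.drop (a + 1)) (d + 1) (pos + (a : Int) + 1) n
        else pvLoopB (l.drop (b + 1)) (d - 1) (pos + (b : Int) + 1) n
      | none => pvLoopB (l.drop (b + 1)) (d - 1) (pos + (b : Int) + 1) n
termination_by l.length
decreasing_by
  all_goals
    (have hl : 0 < l.length := by cases l with | nil => simp at hc | cons => simp
     simp [List.length_drop]; omega)

def remove_method_alt (s : String) (sig : String) : String :=
  let start := PySem.Str.find s sig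
  if start = -1 then s
  else
    let ob := PySem.Str.findFrom s "{" start
    if ob = -1 then s
    else
      let pos := pvLoopB (s.toList.drop (ob.toNat + 1)) 1 (ob + 1) (s.toList.length : Int)
      String.mk (PySem.List.slice s.toList none (some start) ++
                 PySem.List.slice s.toList (some pos) none)

-- ===== PRECONDITION & SPEC =====
def Spec_remove_method (s : String) (sig : String) (out : String) : Prop := out = remove_method_alt s sig
instance (s : String) (sig : String) (out : String) : Decidable (Spec_remove_method s sig out) := by unfold Spec_remove_method; infer_instance

-- ===== CLAIM (what is proved, stated in full; the proofs are below) =====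
def Claim_equal_remove_method : Prop := ∀ (s : String) (sig : String), Dom_remove_method s sig → Spec_remove_method s sig (remove_method s sig)

-- ===== LEMMAS AND PROOFS =====

-- one-step unfolding of pvLoopB as a plain (non-dependent) match, usable with simp/rw
theorem pvLoopB_eq (l : List Char) (d pos n : Int) (hd : 0 < d) :
    pvLoopB l d pos n =
      match l.findIdx? (· == '}') with
      | none => n
      | some b =>
        match l.findIdx? (· == '{') with
        | some a =>
          if a < b then pvLoopB (l.drop (a + 1)) (d + 1) (pos + (a : Int) + 1) n
          else pvLoopB (l.drop (b + 1)) (d - 1) (pos + (b : Int) + 1) n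
        | none => pvLoopB (l.drop (b + 1)) (d - 1) (pos + (b : Int) + 1) n := by
  rw [pvLoopB, if_neg (not_le.mpr hd)]
  split
  · rename_i heq; rw [heq]
  · rename_i b heq; rw [heq]

theorem pvLoopA_nonpos (l : List Char) (d i : Int) (hd : d ≤ 0) : pvLoopA l d i = i := by
  cases l with
  | nil => rfl
  | cons c cs => simp [pvLoopA, hd]

theorem pvLoopB_nonpos (l : List Char) (d pos n : Int) (hd : d ≤ 0) : pvLoopB l d pos n = pos := by
  rw [pvLoopB, if_pos hd]

theorem pvLoopA_noClose (l : List Char) (d i : Int) (hd : 0 < d) (h : '}' ∉ l) :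
    pvLoopA l d i = i + l.length := by
  induction l generalizing d i with
  | nil => simp [pvLoopA]
  | cons c cs ih =>
    have hc : c ≠ '}' := fun hc => h (hc ▸ List.mem_cons_self)
    have hcs : '}' ∉ cs := fun hm => h (List.mem_cons_of_mem _ hm)
    have h2 : (c == '}') = false := beq_eq_false_iff_ne.mpr hc
    rw [pvLoopA, if_neg (not_le.mpr hd)]
    by_cases ho : c = '{'
    · subst ho
      simp only [beq_self_eq_true, if_true]
      rw [ih (d + 1) (i + 1) (by omega) hcs]
      simp; omega
    · have h1 : (c == '{') = false := beq_eq_false_iff_ne.mpr ho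
      simp only [h1, h2, Bool.false_eq_true, if_false]
      rw [ih d (i + 1) hd hcs]
      simp; omega

theorem pvLoopB_skip (c : Char) (cs : List Char) (d pos n : Int)
    (hd : 0 < d) (ho : c ≠ '{') (hc : c ≠ '}') :
    pvLoopB (c :: cs) d pos n = pvLoopB cs d (pos + 1) n := by
  have h1 : (c == '{') = false := beq_eq_false_iff_ne.mpr ho
  have h2 : (c == '}') = false := beq_eq_false_iff_ne.mpr hc
  rw [pvLoopB_eq _ _ _ _ hd, pvLoopB_eq _ _ _ _ hd]
  simp only [List.findIdx?_cons, h1, h2, Bool.false_eq_true, if_false]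
  rcases fb : cs.findIdx? (· == '}') with _ | b'
  · simp
  · simp only [Option.map_some]
    rcases fo : cs.findIdx? (· == '{') with _ | a'
    · simp only [Option.map_none, List.drop_succ_cons]
      congr 1
      push_cast; ring
    · simp only [Option.map_some]
      by_cases hab : a' < b'
      · rw [if_pos (by omega : a' + 1 < b' + 1), if_pos hab]
        simp only [List.drop_succ_cons]
        congr 1
        push_cast; ring
      · rw [if_neg (by omega : ¬ a' + 1 < b' + 1), if_neg hab]
        simp only [List.drop_succ_cons]
        congr 1
        push_cast; ring

theorem pvLoopAB (l : List Char) (d i : Int) (hd : 0 < d) :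
    pvLoopA l d i = pvLoopB l d i (i + l.length) := by
  induction l generalizing d i with
  | nil =>
    rw [pvLoopB_eq _ _ _ _ hd]
    simp [pvLoopA]
  | cons c cs ih =>
    by_cases ho : c = '{'
    · subst ho
      rw [pvLoopA, if_neg (not_le.mpr hd)]
      simp only [beq_self_eq_true, if_true]
      rw [pvLoopB_eq _ _ _ _ hd]
      simp only [List.findIdx?_cons, beq_self_eq_true, if_true,
        (by decide : ('{' == '}') = false), Bool.false_eq_true, if_false]
      rcases fb : cs.findIdx? (· == '}') with _ | b'
      · -- no '}' ahead: A walks to the end, B returns n = len(s)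
        rw [pvLoopA_noClose cs (d + 1) (i + 1) (by omega)
            (by intro hm
                have h := List.findIdx?_eq_none_iff.mp fb '}' hm
                simp at h)]
        simp only [Option.map_none, List.length_cons]
        push_cast; ring
      · simp only [Option.map_some]
        rw [if_pos (by omega : (0:Nat) < b' + 1)]
        rw [ih (d + 1) (i + 1) (by omega)]
        simp only [List.drop_succ_cons, List.drop_zero, List.length_cons]
        congr 1
        · push_cast; ring
        · push_cast; ring
    · by_cases hc : c = '}'
      · subst hc
        rw [pvLoopA, if_neg (not_le.mpr hd)]
        simp only [beq_self_eq_true, if_true,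
          (by decide : ('}' == '{') = false), Bool.false_eq_true, if_false]
        rw [pvLoopB_eq _ _ _ _ hd]
        simp only [List.findIdx?_cons, beq_self_eq_true, if_true,
          (by decide : ('}' == '{') = false), Bool.false_eq_true, if_false]
        have hn : i + ((('}' :: cs).length : Nat) : Int) = i + 1 + cs.length := by
          simp only [List.length_cons]; push_cast; ring
        have hclose : ∀ m : Int,
            pvLoopB (('}' :: cs).drop (0 + 1)) (d - 1) (i + ((0:Nat) : Int) + 1) m
              = pvLoopB cs (d - 1) (i + 1) m := by
          intro m
          simp only [List.drop_succ_cons, List.drop_zero]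
          congr 1
          push_cast; ring
        have key : pvLoopA cs (d - 1) (i + 1) = pvLoopB cs (d - 1) (i + 1) (i + 1 + cs.length) := by
          by_cases hd1 : 0 < d - 1
          · exact ih (d - 1) (i + 1) hd1
          · rw [pvLoopA_nonpos cs _ _ (by omega), pvLoopB_nonpos cs _ _ _ (by omega)]
        rcases fo : cs.findIdx? (· == '{') with _ | a'
        · simp only [Option.map_none]
          rw [hclose, hn]
          exact key
        · simp only [Option.map_some]
          rw [if_neg (by omega : ¬ a' + 1 < 0)]
          rw [hclose, hn]
          exact key
      · -- ordinary character: A steps past it, B's jump scan skips it (pvLoopB_skip)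
        rw [pvLoopA, if_neg (not_le.mpr hd)]
        have h1 : (c == '{') = false := beq_eq_false_iff_ne.mpr ho
        have h2 : (c == '}') = false := beq_eq_false_iff_ne.mpr hc
        simp only [h1, h2, Bool.false_eq_true, if_false]
        rw [pvLoopB_skip c cs d i _ hd ho hc]
        rw [ih d (i + 1) hd]
        congr 1
        simp only [List.length_cons]; push_cast; ring

theorem ports_eq (s sig : String) : remove_method s sig = remove_method_alt s sig := by
  unfold remove_method remove_method_alt
  simp only [PySem.Str.find_eq, PySem.Str.findFrom_eq, ne_eq, ite_not]
  set start := PySem.Chars.find s.toList sig.toList with hst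
  by_cases h1 : start = -1
  · rw [if_pos h1, if_pos h1]
  · rw [if_neg h1, if_neg h1]
    set ob := PySem.Chars.findFrom s.toList "{".toList start none with hob
    by_cases h2 : ob = -1
    · rw [if_pos h2, if_pos h2]
    · rw [if_neg h2, if_neg h2]
      -- the two sides differ only in the end index: A's walk vs B's jump scan
      have hs0 : 0 ≤ start := by
        have := PySem.Chars.neg_one_le_find s.toList sig.toList
        omega
      have hsl : start ≤ (s.toList.length : Int) :=
        PySem.Chars.find_le_length s.toList sig.toList
      have hk : start.toNat ≤ s.toList.length := by omega
      have hcast : ((start.toNat : Nat) : Int) = start := by omega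
      have h2' : PySem.Chars.findFrom s.toList "{".toList ((start.toNat : Nat) : Int) none ≠ -1 := by
        rw [hcast, ← hob]; exact h2
      have hspec := PySem.Chars.findFrom_natCast_spec s.toList "{".toList start.toNat hk h2'
      rw [hcast, ← hob] at hspec
      have hob0 : 0 ≤ ob := le_trans (by omega) hspec.1
      have hoblt : ob.toNat < s.toList.length := by
        have hpre := hspec.2.1
        have hne : s.toList.drop ob.toNat ≠ [] := by
          intro hnil
          rw [hnil] at hpre
          have h0 : "{".toList = [] := List.prefix_nil.mp hpre
          simp at h0
        by_contra hge
        exact hne (List.drop_eq_nil_of_le (by omega))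
      have hlen : ob + 1 + (((s.toList.drop (ob.toNat + 1)).length : Nat) : Int)
          = ((s.toList.length : Nat) : Int) := by
        simp only [List.length_drop]
        omega
      rw [pvLoopAB _ 1 (ob + 1) (by omega), hlen]

-- ===== VERDICT (by name: the statement is the Claim_ definition above) =====
theorem remove_method_spec : Claim_equal_remove_method := by
  intro s sig _
  unfold Spec_remove_method
  exact ports_eq s sig
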